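-- pv_equiv track=rewrite | github.com/NobuyukiInoue/LeetCode | Problems/1900_1999/1935_Maximum_Number_of_Words_You_Can_Type/Project_Python3/Maximum_Number_of_Words_You_Can_Type.py | canBeTypedWords2
-- ===== SOURCE A (Python) =====
-- def canBeTypedWords2(text: str, brokenLetters: str) -> int:
--     # 32ms
--     ans = 0
--     words = text.split()
--     for word in words:
--         used = False
--         for ch in brokenLetters:
--             if ch in word:
--                 used = True
--                 break
--         if not used:
--             ans += 1
--     return ans
-- ===== SOURCE B (Python) =====
-- def canBeTypedWords2(text: str, brokenLetters: str) -> int: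
--     # single pass over the characters of text: a tiny state machine tracking
--     # whether we are inside a word and whether it is still clean; no split().
--     broken = set(brokenLetters)
--     ans = 0
--     in_word = False
--     clean = True
--     for c in text:
--         if c.isspace():
--             if in_word and clean:
--                 ans += 1
--             in_word = False
--             clean = True
--         else:
--             in_word = True
--             if c in broken:
--                 clean = False
--     if in_word and clean:
--         ans += 1
--     return ans
-- ===== Notes on version B (the rewrite author's own statement) =====
-- stated objective: alternative
-- what changed: B never splits the text: it runs one character-level state machine over text (tracking in_word/clean flags against a precomputed broken-letter set) and counts word boundaries, instead of A's split() followed by a per-word scan over the brokenLetters string with substring tests and a break flag.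
import Mathlib
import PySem

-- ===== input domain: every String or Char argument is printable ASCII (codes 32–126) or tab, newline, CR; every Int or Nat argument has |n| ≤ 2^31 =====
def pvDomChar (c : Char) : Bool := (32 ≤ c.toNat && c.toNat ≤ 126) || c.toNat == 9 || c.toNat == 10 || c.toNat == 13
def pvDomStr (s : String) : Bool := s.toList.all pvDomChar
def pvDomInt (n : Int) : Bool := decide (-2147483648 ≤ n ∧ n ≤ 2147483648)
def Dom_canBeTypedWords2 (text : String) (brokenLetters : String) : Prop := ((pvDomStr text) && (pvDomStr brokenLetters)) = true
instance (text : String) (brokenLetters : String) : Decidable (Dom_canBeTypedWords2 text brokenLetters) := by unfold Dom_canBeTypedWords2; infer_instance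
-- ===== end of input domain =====

-- B replaces A's split()-then-per-word-scan with a single character-level state machine over text (alternative decomposition, same cost class).
-- ===== PORT A =====
-- A: split the text into words, then for each word scan brokenLetters with a break flag ('used');
-- 'ch in word' for a single character ch is exactly char membership in the word (exact here).
def canBeTypedWords2 (text : String) (brokenLetters : String) : Int :=
  let words := PySem.Str.split₀ text
  words.foldl (fun ans word =>
    let used := brokenLetters.toList.any (fun ch => word.toList.contains ch)
    if !used then ans + 1 else ans) 0

-- ===== PORT B =====
-- B: one pass over text's characters with state (ans, in_word, clean); a word ends at whitespace or at the end of text.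
def canBeTypedWords2_alt (text : String) (brokenLetters : String) : Int :=
  let broken := PySem.Set.ofList brokenLetters.toList
  let st := text.toList.foldl (fun (st : Int × Bool × Bool) c =>
      if PySem.Chars.isspace c then
        (if st.2.1 && st.2.2 then st.1 + 1 else st.1, false, true)
      else
        (st.1, true, st.2.2 && !(PySem.Set.contains broken c))) (0, false, true)
  if st.2.1 && st.2.2 then st.1 + 1 else st.1

-- ===== PRECONDITION & SPEC =====
def Spec_canBeTypedWords2 (text : String) (brokenLetters : String) (out : Int) : Prop := out = canBeTypedWords2_alt text brokenLetters
instance (text : String) (brokenLetters : String) (out : Int) : Decidable (Spec_canBeTypedWords2 text brokenLetters out) := by unfold Spec_canBeTypedWords2; infer_instance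

-- ===== CLAIM (what is proved, stated in full; the proofs are below) =====
def Claim_equal_canBeTypedWords2 : Prop := ∀ (text : String) (brokenLetters : String), Dom_canBeTypedWords2 text brokenLetters → Spec_canBeTypedWords2 text brokenLetters (canBeTypedWords2 text brokenLetters)

-- ===== LEMMAS AND PROOFS =====

-- proof-only abbreviations: B's fold step, B's finaliser, and A's per-word counting step
def pvStep (bl : List Char) (st : Int × Bool × Bool) (c : Char) : Int × Bool × Bool :=
  if PySem.Chars.isspace c then
    (if st.2.1 && st.2.2 then st.1 + 1 else st.1, false, true)
  else
    (st.1, true, st.2.2 && !(PySem.Set.contains (PySem.Set.ofList bl) c))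

def pvFin (st : Int × Bool × Bool) : Int := if st.2.1 && st.2.2 then st.1 + 1 else st.1

def pvCnt (bl : List Char) (a : Int) (w : List Char) : Int :=
  if !(bl.any (fun ch => w.contains ch)) then a + 1 else a

-- hand-proved equation lemmas for split₀.go (cheap rfl rewrites; simp-unfolding the brecOn blows up the kernel)
lemma pv_go_nil (cur : List Char) (acc : List (List Char)) :
    PySem.Chars.split₀.go [] cur acc
      = if cur.isEmpty then acc.reverse else (cur.reverse :: acc).reverse := rfl

lemma pv_go_cons (c : Char) (rest cur : List Char) (acc : List (List Char)) :
    PySem.Chars.split₀.go (c :: rest) cur acc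
      = if PySem.Chars.isspace c then
          (if cur.isEmpty then PySem.Chars.split₀.go rest [] acc
           else PySem.Chars.split₀.go rest [] (cur.reverse :: acc))
        else PySem.Chars.split₀.go rest (c :: cur) acc := rfl

-- split₀.go's accumulator only collects already-finished words in front
lemma pv_go_append (cs : List Char) : ∀ (cur : List Char) (acc : List (List Char)),
    PySem.Chars.split₀.go cs cur acc = acc.reverse ++ PySem.Chars.split₀.go cs cur [] := by
  induction cs with
  | nil =>
    intro cur acc
    rw [pv_go_nil, pv_go_nil]
    by_cases h : cur.isEmpty <;> simp [h]
  | cons c rest ih =>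
    intro cur acc
    rw [pv_go_cons, pv_go_cons]
    by_cases hs : PySem.Chars.isspace c
    · by_cases h : cur.isEmpty
      · simp only [hs, h, if_true]
        exact ih [] acc
      · simp only [hs, h, if_true, Bool.false_eq_true, if_false]
        rw [ih [] (cur.reverse :: acc), ih [] [cur.reverse]]
        simp
    · simp only [hs, Bool.false_eq_true, if_false]
      exact ih (c :: cur) acc

-- extending the current word by a non-space char updates B's clean flag exactly
lemma pv_clean_cons (bl cur : List Char) (c : Char) :
    (!(bl.any (fun ch => cur.contains ch)) && !(PySem.Set.contains (PySem.Set.ofList bl) c))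
      = !(bl.any (fun ch => (c :: cur).contains ch)) := by
  rw [Bool.eq_iff_iff]
  simp only [Bool.and_eq_true, Bool.not_eq_true', List.any_eq_false, List.contains_eq_mem,
    PySem.Set.contains, decide_eq_false_iff_not, PySem.Set.mem_ofList, List.mem_cons,
    not_or, decide_eq_true_eq]
  constructor
  · rintro ⟨h1, h2⟩ x hx
    exact ⟨fun he => h2 (he ▸ hx), h1 x hx⟩
  · intro h
    exact ⟨fun x hx => (h x hx).2, fun hc => (h c hc).1 rfl⟩

lemma pv_cnt_reverse (bl cur : List Char) (a : Int) :
    pvCnt bl a cur.reverse = if !(bl.any (fun ch => cur.contains ch)) then a + 1 else a := by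
  simp [pvCnt, List.contains_eq_mem]

-- main invariant: running B's state machine from the middle of a word equals counting the remaining words
lemma pv_main (bl : List Char) (cs : List Char) : ∀ (cur : List Char) (a : Int),
    pvFin (cs.foldl (pvStep bl) (a, !cur.isEmpty, !(bl.any (fun ch => cur.contains ch))))
      = (PySem.Chars.split₀.go cs cur []).foldl (pvCnt bl) a := by
  induction cs with
  | nil =>
    intro cur a
    simp only [List.foldl_nil]
    rw [pv_go_nil]
    by_cases h : cur.isEmpty
    · have : cur = [] := by simpa [List.isEmpty_iff] using h
      subst this
      simp [pvFin]
    · rw [if_neg h]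
      have hb : (!cur.isEmpty) = true := by simp [h]
      simp only [List.reverse_cons, List.reverse_nil, List.nil_append, List.foldl_cons,
        List.foldl_nil, pv_cnt_reverse, pvFin, hb, Bool.true_and]
  | cons c rest ih =>
    intro cur a
    simp only [List.foldl_cons]
    by_cases hs : PySem.Chars.isspace c
    · have hstep : pvStep bl (a, !cur.isEmpty, !(bl.any (fun ch => cur.contains ch))) c
          = ((if !cur.isEmpty && !(bl.any fun ch => cur.contains ch) then a + 1 else a),
             !([] : List Char).isEmpty, !(bl.any (fun ch => ([] : List Char).contains ch))) := by
        simp [pvStep, hs]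
      rw [hstep, ih []]
      rw [pv_go_cons, if_pos hs]
      by_cases h : cur.isEmpty
      · simp [h]
      · rw [if_neg h, pv_go_append rest [] [cur.reverse]]
        simp only [List.reverse_cons, List.reverse_nil, List.nil_append, List.cons_append,
          List.foldl_cons]
        congr 1
        rw [pv_cnt_reverse]
        simp [h]
    · have hstep : pvStep bl (a, !cur.isEmpty, !(bl.any (fun ch => cur.contains ch))) c
          = (a, !(c :: cur).isEmpty, !(bl.any (fun ch => (c :: cur).contains ch))) := by
        simp only [pvStep, hs, Bool.false_eq_true, if_false, pv_clean_cons, List.isEmpty_cons,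
          Bool.not_false]
      rw [hstep, ih (c :: cur)]
      rw [pv_go_cons, if_neg hs]

-- A's fold over the split words is counting with pvCnt over split₀ of the char list
lemma pv_A_eq (text bl : String) :
    canBeTypedWords2 text bl = (PySem.Chars.split₀ text.toList).foldl (pvCnt bl.toList) 0 := by
  unfold canBeTypedWords2
  rw [← PySem.Str.split₀_map_toList, List.foldl_map]
  rfl

lemma pv_B_eq (text bl : String) :
    canBeTypedWords2_alt text bl
      = pvFin (text.toList.foldl (pvStep bl.toList) (0, false, true)) := rfl

-- ===== VERDICT (by name: the statement is the Claim_ definition above) =====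
theorem canBeTypedWords2_spec : Claim_equal_canBeTypedWords2 := by
  intro text bl _
  unfold Spec_canBeTypedWords2
  rw [pv_A_eq, pv_B_eq]
  have h0 : ((0 : Int), false, true)
      = ((0 : Int), !([] : List Char).isEmpty, !(bl.toList.any fun ch => ([] : List Char).contains ch)) := by
    simp
  rw [h0, pv_main bl.toList text.toList [] 0]
  rfl
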